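-- pv_equiv track=rewrite | github.com/shubhcoding01/ai-ticket-resolver | automation/runner.py | _pick_app_name
-- ===== SOURCE A (Python) =====
-- def _pick_app_name(apps: list) -> str:
--     """
--     Pick the most relevant app name from the list of apps
--     detected in the ticket text.
--
--     Args:
--         apps : List of detected app name strings
--
--     Returns:
--         Single app name string to install
--     """
--     priority_apps = [
--         "zoom", "microsoft teams", "ms teams", "teams",
--         "chrome", "google chrome",
--         "ms office", "microsoft office", "office",
--         "outlook",
--         "adobe acrobat", "acrobat",
--         "vpn", "cisco vpn", "anyconnect",
--     ]
--
--     for app in priority_apps: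
--         if app in apps:
--             return app
--
--     if apps:
--         return apps[0]
--
--     return "unknown_app"
-- ===== SOURCE B (Python) =====
-- PRIORITY_APPS = [
--     "zoom", "microsoft teams", "ms teams", "teams",
--     "chrome", "google chrome",
--     "ms office", "microsoft office", "office",
--     "outlook",
--     "adobe acrobat", "acrobat",
--     "vpn", "cisco vpn", "anyconnect",
-- ]
--
--
-- def _pick_app_name(apps: list) -> str:
--     rank = {app: i for i, app in enumerate(PRIORITY_APPS)}
--     best = None  # (rank, app) of the best-ranked priority app seen so far
--     for app in apps:
--         r = rank.get(app)
--         if r is not None and (best is None or r < best[0]):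
--             best = (r, app)
--     if best is not None:
--         return best[1]
--     return apps[0] if apps else "unknown_app"
-- ===== Notes on version B (the rewrite author's own statement) =====
-- stated objective: faster
-- what changed: A scans `apps` once per priority app (15 membership tests of the whole list); B builds a rank table once and makes a single pass over `apps`, keeping the (rank, app) pair with the smallest rank.
import Mathlib
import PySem

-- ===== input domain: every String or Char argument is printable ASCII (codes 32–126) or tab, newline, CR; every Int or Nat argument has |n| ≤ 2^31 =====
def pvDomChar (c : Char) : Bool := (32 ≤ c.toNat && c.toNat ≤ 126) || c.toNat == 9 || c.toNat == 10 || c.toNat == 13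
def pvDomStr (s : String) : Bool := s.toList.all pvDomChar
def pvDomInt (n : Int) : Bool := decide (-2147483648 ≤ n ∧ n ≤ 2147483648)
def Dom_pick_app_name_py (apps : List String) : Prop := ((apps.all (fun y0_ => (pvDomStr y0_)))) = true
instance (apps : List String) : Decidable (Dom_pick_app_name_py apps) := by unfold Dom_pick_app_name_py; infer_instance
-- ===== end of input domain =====

-- B replaces A's 15 membership scans of `apps` (one per priority app) by a single pass over
-- `apps` consulting a rank table and keeping the lowest-ranked match (objective: faster, constant factor).

-- ===== PORT A =====
def priorityApps : List String :=
  ["zoom", "microsoft teams", "ms teams", "teams",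
   "chrome", "google chrome",
   "ms office", "microsoft office", "office",
   "outlook",
   "adobe acrobat", "acrobat",
   "vpn", "cisco vpn", "anyconnect"]

-- `for app in priority_apps: if app in apps: return app` = first element of priorityApps contained in apps
def pick_app_name_py (apps : List String) : String :=
  match priorityApps.find? (fun app => apps.contains app) with
  | some app => app
  | none =>
    match apps with
    | a :: _ => a
    | [] => "unknown_app"

-- ===== PORT B =====
-- rank = {app: i for i, app in enumerate(PRIORITY_APPS)}
def rankDict : PySem.Dict String Int :=
  (PySem.List.enumerate priorityApps).foldl (fun d p => d.insert p.2 p.1) PySem.Dict.empty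

-- one iteration of B's loop: keep the (rank, app) pair with the smallest rank seen so far
def bestStep (best : Option (Int × String)) (app : String) : Option (Int × String) :=
  match rankDict.get? app with
  | none => best
  | some r =>
    match best with
    | none => some (r, app)
    | some (b, _) => if r < b then some (r, app) else best

def pick_app_name_py_alt (apps : List String) : String :=
  match apps.foldl bestStep none with
  | some (_, app) => app
  | none =>
    match apps with
    | a :: _ => a
    | [] => "unknown_app"

-- ===== PRECONDITION & SPEC =====
def Spec_pick_app_name_py (apps : List String) (out : String) : Prop := out = pick_app_name_py_alt apps
instance (apps : List String) (out : String) : Decidable (Spec_pick_app_name_py apps out) := by unfold Spec_pick_app_name_py; infer_instance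

-- ===== CLAIM (what is proved, stated in full; the proofs are below) =====
def Claim_equal_pick_app_name_py : Prop := ∀ (apps : List String), Dom_pick_app_name_py apps → Spec_pick_app_name_py apps (pick_app_name_py apps)

-- ===== LEMMAS AND PROOFS =====

lemma idx_of_rank (a : String) (r : Int) (h : rankDict.get? a = some r) :
    ∃ i : Fin priorityApps.length, r = (i : Int) ∧ priorityApps[i] = a := by
  have hmem : (a, r) ∈ rankDict.items :=
    PySem.Dict.mem_items_of_get?_eq_some _ h
  have hit : rankDict.items =
    [("zoom",0),("microsoft teams",1),("ms teams",2),("teams",3),("chrome",4),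
     ("google chrome",5),("ms office",6),("microsoft office",7),("office",8),
     ("outlook",9),("adobe acrobat",10),("acrobat",11),("vpn",12),("cisco vpn",13),
     ("anyconnect",14)] := by decide
  rw [hit] at hmem
  simp only [List.mem_cons, List.not_mem_nil, or_false, Prod.mk.injEq] at hmem
  rcases hmem with ⟨rfl,rfl⟩|⟨rfl,rfl⟩|⟨rfl,rfl⟩|⟨rfl,rfl⟩|⟨rfl,rfl⟩|⟨rfl,rfl⟩|⟨rfl,rfl⟩|⟨rfl,rfl⟩|⟨rfl,rfl⟩|⟨rfl,rfl⟩|⟨rfl,rfl⟩|⟨rfl,rfl⟩|⟨rfl,rfl⟩|⟨rfl,rfl⟩|⟨rfl,rfl⟩ <;> decide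

lemma fold_none (l : List String) :
    (∀ x ∈ l, rankDict.get? x = none) → l.foldl bestStep none = none := by
  induction l with
  | nil => intro _; rfl
  | cons x t ih =>
    intro h
    have hx := h x (by simp)
    simp only [List.foldl_cons, bestStep, hx]
    exact ih (fun y hy => h y (by simp [hy]))

lemma fold_some (l : List String) :
    ∀ (s : Option (Int × String)) (r : Int) (a : String),
    l.foldl bestStep s = some (r, a) →
    ((rankDict.get? a = some r ∧ a ∈ l) ∨ s = some (r, a)) ∧
    (∀ a' ∈ l, ∀ r', rankDict.get? a' = some r' → r ≤ r') ∧
    (∀ m b, s = some (m, b) → r ≤ m) := by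
  induction l with
  | nil =>
    intro s r a h
    simp only [List.foldl_nil] at h
    subst h
    exact ⟨Or.inr rfl, by simp, fun m b hs => by simp_all⟩
  | cons x t ih =>
    intro s r a h
    simp only [List.foldl_cons] at h
    obtain ⟨h1, h2, h3⟩ := ih (bestStep s x) r a h
    refine ⟨?_, ?_, ?_⟩
    · rcases h1 with ⟨hg, hm⟩ | hstep
      · exact Or.inl ⟨hg, List.mem_cons_of_mem _ hm⟩
      · unfold bestStep at hstep
        rcases hgx : rankDict.get? x with _ | rx
        · rw [hgx] at hstep; exact Or.inr hstep
        · rw [hgx] at hstep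
          rcases s with _ | ⟨m, b⟩
          · simp only [Option.some.injEq, Prod.mk.injEq] at hstep
            exact Or.inl ⟨hstep.2 ▸ hstep.1 ▸ hgx, hstep.2 ▸ List.mem_cons_self⟩
          · by_cases hlt : rx < m
            · simp only [if_pos hlt, Option.some.injEq, Prod.mk.injEq] at hstep
              exact Or.inl ⟨hstep.2 ▸ hstep.1 ▸ hgx, hstep.2 ▸ List.mem_cons_self⟩
            · simp only [if_neg hlt] at hstep
              exact Or.inr hstep
    · intro a' ha' r' hr'
      rcases List.mem_cons.mp ha' with rfl | hmem
      · unfold bestStep at h3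
        rw [hr'] at h3
        rcases s with _ | ⟨m, b⟩
        · exact h3 _ _ rfl
        · by_cases hlt : r' < m
          · simp only [if_pos hlt] at h3
            exact h3 _ _ rfl
          · have := h3 m b (by simp [if_neg hlt])
            omega
      · exact h2 a' hmem r' hr'
    · intro m b hs
      subst hs
      unfold bestStep at h3
      rcases hgx : rankDict.get? x with _ | rx
      · rw [hgx] at h3; exact h3 m b rfl
      · rw [hgx] at h3
        by_cases hlt : rx < m
        · have := h3 rx x (by simp [if_pos hlt])
          omega
        · exact h3 m b (by simp [if_neg hlt])

lemma fold_some_state (l : List String) :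
    ∀ p : Int × String, ∃ q, l.foldl bestStep (some p) = some q := by
  induction l with
  | nil => exact fun p => ⟨p, rfl⟩
  | cons x t ih =>
    intro p
    simp only [List.foldl_cons]
    rcases hgx : rankDict.get? x with _ | rx
    · simpa [bestStep, hgx] using ih p
    · rcases p with ⟨m, b⟩
      by_cases hlt : rx < m
      · simpa [bestStep, hgx, hlt] using ih (rx, x)
      · simpa [bestStep, hgx, hlt] using ih (m, b)

lemma fold_ne_none (l : List String) :
    ∀ (s : Option (Int × String)) (x : String) (rx : Int), x ∈ l →
    rankDict.get? x = some rx → ∃ q, l.foldl bestStep s = some q := by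
  induction l with
  | nil => intro _ _ _ h; exact absurd h (List.not_mem_nil)
  | cons y t ih =>
    intro s x rx hx hgx
    simp only [List.foldl_cons]
    rcases List.mem_cons.mp hx with rfl | hmem
    · have : ∃ p, bestStep s x = some p := by
        rcases s with _ | ⟨m, b⟩
        · exact ⟨(rx, x), by simp [bestStep, hgx]⟩
        · by_cases hlt : rx < m
          · exact ⟨(rx, x), by simp [bestStep, hgx, hlt]⟩
          · exact ⟨(m, b), by simp [bestStep, hgx, hlt]⟩
      obtain ⟨p, hp⟩ := this
      rw [hp]; exact fold_some_state t p
    · exact ih (bestStep s y) x rx hmem hgx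

lemma rank_of_idx : ∀ i : Fin priorityApps.length,
    rankDict.get? priorityApps[i] = some (i : Int) := by decide

lemma ports_agree (apps : List String) :
    pick_app_name_py apps = pick_app_name_py_alt apps := by
  unfold pick_app_name_py pick_app_name_py_alt
  rcases hf : priorityApps.find? (fun app => apps.contains app) with _ | p
  · have hnone : ∀ x ∈ apps, rankDict.get? x = none := by
      intro x hx
      rcases hgx : rankDict.get? x with _ | r
      · rfl
      · obtain ⟨i, hri, hpi⟩ := idx_of_rank x r hgx
        have hni := List.find?_eq_none.mp hf priorityApps[i] (List.getElem_mem _)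
        rw [hpi] at hni
        simp at hni
        exact absurd hx hni
    rw [fold_none apps hnone]
  · obtain ⟨hp, i, hi, hpi, hmin⟩ := List.find?_eq_some_iff_getElem.mp hf
    have hpmem : p ∈ apps := by simpa using hp
    have hpr : rankDict.get? p = some (i : Int) := by
      have := rank_of_idx ⟨i, hi⟩
      simpa [hpi] using this
    obtain ⟨⟨r, a⟩, hfold⟩ := fold_ne_none apps none p i hpmem hpr
    rw [hfold]
    obtain ⟨h1, h2, _⟩ := fold_some apps none r a hfold
    rcases h1 with ⟨hga, hamem⟩ | hcon
    · have hle : r ≤ (i : Int) := h2 p hpmem _ hpr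
      obtain ⟨j, hrj, hpj⟩ := idx_of_rank a r hga
      have hpj' : priorityApps[(j : Nat)]'j.isLt = a := by simpa using hpj
      have hnotlt : ¬ ((j : Nat) < i) := by
        intro hlt
        have hc := hmin (j : Nat) hlt
        rw [hpj'] at hc
        simp at hc
        exact absurd hamem hc
      have hjv : r = ((j : Nat) : Int) := by exact_mod_cast hrj
      have hji : (j : Nat) = i := by omega
      have hap : a = p := by
        rw [← hpi, ← hpj']
        congr 1
      simp [hap]
    · simp at hcon

-- ===== VERDICT (by name: the statement is the Claim_ definition above) =====
theorem pick_app_name_py_spec : Claim_equal_pick_app_name_py := by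
  intro apps _
  unfold Spec_pick_app_name_py
  exact ports_agree apps
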